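-- pv_equiv track=rewrite | github.com/huangziwei/nk | src/nk/core.py | _chapter_marker_spans
-- ===== SOURCE A (Python) =====
-- CHAPTER_MARKER_PREFIX = "[[NKCHAP:"
--
-- CHAPTER_MARKER_SUFFIX = "]]"
--
-- def _chapter_marker_spans(text: str) -> list[tuple[int, int]]:
--     spans: list[tuple[int, int]] = []
--     search_pos = 0
--     while True:
--         start = text.find(CHAPTER_MARKER_PREFIX, search_pos)
--         if start == -1:
--             break
--         end_marker = text.find(CHAPTER_MARKER_SUFFIX, start + len(CHAPTER_MARKER_PREFIX))
--         if end_marker == -1: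
--             break
--         end = end_marker + len(CHAPTER_MARKER_SUFFIX)
--         spans.append((start, end))
--         search_pos = end
--     return spans
-- ===== SOURCE B (Python) =====
-- CHAPTER_MARKER_PREFIX = "[[NKCHAP:"
--
-- CHAPTER_MARKER_SUFFIX = "]]"
--
--
-- def _chapter_marker_spans(text: str) -> list[tuple[int, int]]:
--     # Single left-to-right character scan with an inside/outside state,
--     # instead of repeated str.find calls.
--     spans: list[tuple[int, int]] = []
--     n = len(text)
--     plen = len(CHAPTER_MARKER_PREFIX)
--     slen = len(CHAPTER_MARKER_SUFFIX)
--     i = 0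
--     start = 0
--     inside = False
--     while i < n:
--         if inside:
--             if text[i:i + slen] == CHAPTER_MARKER_SUFFIX:
--                 spans.append((start, i + slen))
--                 inside = False
--                 i += slen
--             else:
--                 i += 1
--         else:
--             if text[i:i + plen] == CHAPTER_MARKER_PREFIX:
--                 start = i
--                 inside = True
--                 i += plen
--             else:
--                 i += 1
--     return spans
-- ===== Notes on version B (the rewrite author's own statement) =====
-- stated objective: alternative
-- what changed: Replaced the repeated text.find(prefix)/text.find(suffix) loop by a single left-to-right character scan that keeps an inside/outside-marker state and tests the marker literal at each position.
import Mathlib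
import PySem

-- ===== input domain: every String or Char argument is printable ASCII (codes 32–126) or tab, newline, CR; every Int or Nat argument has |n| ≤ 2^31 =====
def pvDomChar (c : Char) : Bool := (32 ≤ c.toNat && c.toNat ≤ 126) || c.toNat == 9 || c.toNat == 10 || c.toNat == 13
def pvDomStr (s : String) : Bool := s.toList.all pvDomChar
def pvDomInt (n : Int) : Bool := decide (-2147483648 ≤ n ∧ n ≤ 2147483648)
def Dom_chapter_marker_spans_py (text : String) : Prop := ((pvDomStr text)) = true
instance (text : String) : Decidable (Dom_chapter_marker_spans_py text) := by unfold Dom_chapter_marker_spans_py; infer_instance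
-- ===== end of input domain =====

-- B replaces the repeated str.find scanning loop by a single left-to-right
-- character scan with an inside/outside state (objective: alternative).

-- Module constants shared by both Python files (CHAPTER_MARKER_PREFIX / _SUFFIX).
def pvPfx : List Char := "[[NKCHAP:".toList
def pvSfx : List Char := "]]".toList

-- ===== PORT A =====
-- text.find(sub, pos) is PySem.Chars.findFrom on text.toList (PySem.Str.findFrom is a thin wrapper).
-- Termination helper cited by pvAGo's decreasing_by: find from a start past the end is -1.
lemma pvFindFrom_gt (s sub : List Char) (k : Nat) (h : s.length < k) :
    PySem.Chars.findFrom s sub (k : Int) none = -1 := by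
  simp only [PySem.Chars.findFrom]
  have h1 : ¬ ((k : Int) < 0) := by omega
  have h2 : (s.length : Int) < (k : Int) := by exact_mod_cast h
  simp [h1, h2]

lemma pvFindFrom_facts (s sub : List Char) (k : Nat) (hk : k ≤ s.length)
    (h : PySem.Chars.findFrom s sub (k : Int) none ≠ -1) :
    (k : Int) ≤ PySem.Chars.findFrom s sub (k : Int) none ∧
    sub <+: s.drop (PySem.Chars.findFrom s sub (k : Int) none).toNat ∧
    (PySem.Chars.findFrom s sub (k : Int) none).toNat + sub.length ≤ s.length := by
  obtain ⟨h1, h2, _⟩ := PySem.Chars.findFrom_natCast_spec s sub k hk h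
  refine ⟨h1, h2, ?_⟩
  have hl := h2.length_le
  rw [List.length_drop] at hl
  have heq := PySem.Chars.findFrom_natCast s sub k hk
  have hge := PySem.Chars.neg_one_le_find (s.drop k) sub
  have hle := PySem.Chars.find_le_length (s.drop k) sub
  rw [List.length_drop] at hle
  rw [heq] at h hl ⊢
  by_cases hf : PySem.Chars.find (s.drop k) sub = -1
  · exact absurd (if_pos hf) h
  · rw [if_neg hf] at hl ⊢
    omega

def pvAGo (cs : List Char) (searchPos : Nat) : List (Int × Int) :=
  if hs : PySem.Chars.findFrom cs pvPfx (searchPos : Int) none = -1 then []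
  else
    if he : PySem.Chars.findFrom cs pvSfx (PySem.Chars.findFrom cs pvPfx (searchPos : Int) none + 9) none = -1 then []
    else
      (PySem.Chars.findFrom cs pvPfx (searchPos : Int) none,
       PySem.Chars.findFrom cs pvSfx (PySem.Chars.findFrom cs pvPfx (searchPos : Int) none + 9) none + 2) ::
        pvAGo cs ((PySem.Chars.findFrom cs pvSfx (PySem.Chars.findFrom cs pvPfx (searchPos : Int) none + 9) none).toNat + 2)
termination_by cs.length + 1 - searchPos
decreasing_by
  have hsp : searchPos ≤ cs.length := by
    by_contra hgt
    exact hs (pvFindFrom_gt cs pvPfx searchPos (by omega))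
  obtain ⟨h1, h2, h3⟩ := pvFindFrom_facts cs pvPfx searchPos hsp hs
  have hcast : PySem.Chars.findFrom cs pvPfx (searchPos : Int) none + 9
      = (((PySem.Chars.findFrom cs pvPfx (searchPos : Int) none).toNat + 9 : Nat) : Int) := by
    omega
  rw [hcast] at he ⊢
  have hplen : pvPfx.length = 9 := by decide
  have hk2 : (PySem.Chars.findFrom cs pvPfx (searchPos : Int) none).toNat + 9 ≤ cs.length := by omega
  obtain ⟨g1, _, g3⟩ := pvFindFrom_facts cs pvSfx _ hk2 he
  have hslen : pvSfx.length = 2 := by decide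
  omega

def chapter_marker_spans_py (text : String) : List (Int × Int) := pvAGo text.toList 0

-- ===== PORT B =====
-- text[i:i+k] == MARKER is PySem.List.slice on text.toList; the scan advances by 1, 2 or 9.
def pvBGo (cs : List Char) (i : Nat) (inside : Bool) (start : Nat) : List (Int × Int) :=
  if i < cs.length then
    if inside then
      if PySem.List.slice cs (some (i : Int)) (some ((i : Int) + 2)) = pvSfx then
        ((start : Int), (i : Int) + 2) :: pvBGo cs (i + 2) false start
      else pvBGo cs (i + 1) true start
    else
      if PySem.List.slice cs (some (i : Int)) (some ((i : Int) + 9)) = pvPfx then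
        pvBGo cs (i + 9) true i
      else pvBGo cs (i + 1) false start
  else []
termination_by cs.length - i

def chapter_marker_spans_py_alt (text : String) : List (Int × Int) := pvBGo text.toList 0 false 0

-- ===== PRECONDITION & SPEC =====
def Spec_chapter_marker_spans_py (text : String) (out : List (Int × Int)) : Prop := out = chapter_marker_spans_py_alt text
instance (text : String) (out : List (Int × Int)) : Decidable (Spec_chapter_marker_spans_py text out) := by unfold Spec_chapter_marker_spans_py; infer_instance

-- ===== CLAIM (what is proved, stated in full; the proofs are below) =====
def Claim_equal_chapter_marker_spans_py : Prop := ∀ (text : String), Dom_chapter_marker_spans_py text → Spec_chapter_marker_spans_py text (chapter_marker_spans_py text)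

-- ===== LEMMAS AND PROOFS =====

-- text[i:i+k] == p  is exactly "p starts at position i" (p of length k).
lemma pvSlice_eq_iff (cs p : List Char) (i k : Nat) (hp : p.length = k) :
    PySem.List.slice cs (some (i : Int)) (some ((i : Int) + (k : Int))) = p ↔ p <+: cs.drop i := by
  rw [PySem.List.slice_natCast_add]
  constructor
  · intro h; rw [← h]; exact List.take_prefix _ _
  · intro h; rw [List.prefix_iff_eq_take] at h; rw [← hp, ← h]

lemma pvSlice9 (cs : List Char) (i : Nat) :
    (PySem.List.slice cs (some (i : Int)) (some ((i : Int) + 9)) = pvPfx) ↔ pvPfx <+: cs.drop i := by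
  have h9 : ((9 : Nat) : Int) = (9 : Int) := by norm_cast
  rw [← h9]
  exact pvSlice_eq_iff cs pvPfx i 9 (by decide)

lemma pvSlice2 (cs : List Char) (i : Nat) :
    (PySem.List.slice cs (some (i : Int)) (some ((i : Int) + 2)) = pvSfx) ↔ pvSfx <+: cs.drop i := by
  have h2 : ((2 : Nat) : Int) = (2 : Int) := by norm_cast
  rw [← h2]
  exact pvSlice_eq_iff cs pvSfx i 2 (by decide)

-- an occurrence at j ≥ k is an occurrence inside cs.drop k
lemma pvNoPfx_from (cs : List Char) (sub : List Char) (k : Nat)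
    (h : ¬ sub <:+: cs.drop k) : ∀ j, k ≤ j → ¬ sub <+: cs.drop j := by
  intro j hj hpre
  apply h
  rw [← PySem.Chars.isIn_iff_infix, ← PySem.Chars.exists_prefix_drop_iff_isIn]
  refine ⟨j - k, ?_⟩
  rw [List.drop_drop]
  have hjk : k + (j - k) = j := by omega
  rwa [hjk]

-- outside mode, no prefix anywhere from i on: result is []
lemma pvBGo_out_none (cs : List Char) :
    ∀ n i st, cs.length - i ≤ n → (∀ j, i ≤ j → ¬ pvPfx <+: cs.drop j) →
      pvBGo cs i false st = [] := by
  intro n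
  induction n with
  | zero =>
    intro i st hn _
    rw [pvBGo]
    simp [show ¬ i < cs.length by omega]
  | succ n ih =>
    intro i st hn hno
    rw [pvBGo]
    by_cases hi : i < cs.length
    · rw [if_pos hi]
      simp only [Bool.false_eq_true, if_false]
      rw [if_neg ((pvSlice9 cs i).not.mpr (hno i le_rfl))]
      exact ih (i + 1) st (by omega) (fun j hj => hno j (by omega))
    · rw [if_neg hi]

-- outside mode: the scan runs forward to the FIRST prefix occurrence p and enters inside mode
lemma pvBGo_out_some (cs : List Char) :
    ∀ n i st p, p - i ≤ n → i ≤ p → pvPfx <+: cs.drop p →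
      (∀ j, i ≤ j → j < p → ¬ pvPfx <+: cs.drop j) →
      pvBGo cs i false st = pvBGo cs (p + 9) true p := by
  intro n
  induction n with
  | zero =>
    intro i st p hn hip hocc _
    have hip' : i = p := by omega
    subst hip'
    have hl := hocc.length_le
    rw [List.length_drop] at hl
    have hplen : pvPfx.length = 9 := by decide
    rw [pvBGo, if_pos (by omega : i < cs.length)]
    simp only [Bool.false_eq_true, if_false]
    rw [if_pos ((pvSlice9 cs i).mpr hocc)]
  | succ n ih =>
    intro i st p hn hip hocc hmin
    by_cases hip' : i = p
    · subst hip'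
      exact ih i st i (by omega) le_rfl hocc hmin
    · have hlt : i < p := by omega
      have hl := hocc.length_le
      rw [List.length_drop] at hl
      have hplen : pvPfx.length = 9 := by decide
      rw [pvBGo, if_pos (by omega : i < cs.length)]
      simp only [Bool.false_eq_true, if_false]
      rw [if_neg ((pvSlice9 cs i).not.mpr (hmin i le_rfl hlt))]
      exact ih (i + 1) st p (by omega) (by omega) hocc (fun j hj hjp => hmin j (by omega) hjp)

-- inside mode, no suffix anywhere from i on: result is []
lemma pvBGo_in_none (cs : List Char) :
    ∀ n i st, cs.length - i ≤ n → (∀ j, i ≤ j → ¬ pvSfx <+: cs.drop j) →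
      pvBGo cs i true st = [] := by
  intro n
  induction n with
  | zero =>
    intro i st hn _
    rw [pvBGo]
    simp [show ¬ i < cs.length by omega]
  | succ n ih =>
    intro i st hn hno
    rw [pvBGo]
    by_cases hi : i < cs.length
    · rw [if_pos hi, if_pos rfl]
      rw [if_neg ((pvSlice2 cs i).not.mpr (hno i le_rfl))]
      exact ih (i + 1) st (by omega) (fun j hj => hno j (by omega))
    · rw [if_neg hi]

-- inside mode: the scan runs forward to the FIRST suffix occurrence e, emits the span, leaves inside mode
lemma pvBGo_in_some (cs : List Char) :
    ∀ n i st e, e - i ≤ n → i ≤ e → pvSfx <+: cs.drop e →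
      (∀ j, i ≤ j → j < e → ¬ pvSfx <+: cs.drop j) →
      pvBGo cs i true st = ((st : Int), (e : Int) + 2) :: pvBGo cs (e + 2) false st := by
  intro n
  induction n with
  | zero =>
    intro i st e hn hie hocc _
    have hie' : i = e := by omega
    subst hie'
    have hl := hocc.length_le
    rw [List.length_drop] at hl
    have hslen : pvSfx.length = 2 := by decide
    rw [pvBGo, if_pos (by omega : i < cs.length), if_pos rfl]
    rw [if_pos ((pvSlice2 cs i).mpr hocc)]
  | succ n ih =>
    intro i st e hn hie hocc hmin
    by_cases hie' : i = e
    · subst hie'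
      exact ih i st i (by omega) le_rfl hocc hmin
    · have hlt : i < e := by omega
      have hl := hocc.length_le
      rw [List.length_drop] at hl
      have hslen : pvSfx.length = 2 := by decide
      rw [pvBGo, if_pos (by omega : i < cs.length), if_pos rfl]
      rw [if_neg ((pvSlice2 cs i).not.mpr (hmin i le_rfl hlt))]
      exact ih (i + 1) st e (by omega) (by omega) hocc (fun j hj hje => hmin j (by omega) hje)

-- main: A's find-loop from search_pos equals B's scan from the same position (outside mode)
lemma pvMain (cs : List Char) :
    ∀ n sp st, cs.length + 1 - sp ≤ n → sp ≤ cs.length →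
      pvAGo cs sp = pvBGo cs sp false st := by
  intro n
  induction n with
  | zero => intro sp st hn hsp; exact absurd hn (by omega)
  | succ n ih =>
    intro sp st hn hsp
    rw [pvAGo]
    by_cases hs : PySem.Chars.findFrom cs pvPfx (sp : Int) none = -1
    · rw [dif_pos hs]
      rw [PySem.Chars.findFrom_natCast_eq_neg_one_iff cs pvPfx sp hsp] at hs
      exact (pvBGo_out_none cs (cs.length - sp) sp st le_rfl (pvNoPfx_from cs pvPfx sp hs)).symm
    · rw [dif_neg hs]
      have hplen : pvPfx.length = 9 := by decide
      have hslen : pvSfx.length = 2 := by decide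
      obtain ⟨h1, h2, h3⟩ := pvFindFrom_facts cs pvPfx sp hsp hs
      have hmin1 := (PySem.Chars.findFrom_natCast_spec cs pvPfx sp hsp hs).2.2
      set P := PySem.Chars.findFrom cs pvPfx (sp : Int) none with hP
      have hPnn : (0 : Int) ≤ P := by omega
      have hcast : P + 9 = ((P.toNat + 9 : Nat) : Int) := by omega
      rw [hcast]
      have hk2 : P.toNat + 9 ≤ cs.length := by omega
      have hout := pvBGo_out_some cs (P.toNat - sp) sp st P.toNat le_rfl (by omega) h2
        (fun j hj hjp => hmin1 j hj hjp)
      by_cases he : PySem.Chars.findFrom cs pvSfx ((P.toNat + 9 : Nat) : Int) none = -1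
      · rw [dif_pos he]
        rw [PySem.Chars.findFrom_natCast_eq_neg_one_iff cs pvSfx _ hk2] at he
        rw [hout]
        exact (pvBGo_in_none cs (cs.length - (P.toNat + 9)) _ _ le_rfl (pvNoPfx_from cs pvSfx _ he)).symm
      · rw [dif_neg he]
        obtain ⟨g1, g2, g3⟩ := pvFindFrom_facts cs pvSfx _ hk2 he
        have gmin := (PySem.Chars.findFrom_natCast_spec cs pvSfx _ hk2 he).2.2
        set E := PySem.Chars.findFrom cs pvSfx ((P.toNat + 9 : Nat) : Int) none with hE
        have hEnn : (0 : Int) ≤ E := by omega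
        have hin := pvBGo_in_some cs (E.toNat - (P.toNat + 9)) (P.toNat + 9) P.toNat E.toNat le_rfl
          (by omega) g2 (fun j hj hje => gmin j hj hje)
        rw [hout, hin]
        have hrec := ih (E.toNat + 2) P.toNat (by omega) (by omega)
        rw [hrec]
        have e3 : ((P : Int), E + 2) = ((P.toNat : Int), (E.toNat : Int) + 2) := by
          rw [Prod.mk.injEq]
          constructor <;> omega
        rw [e3]

theorem pv_eq (text : String) : chapter_marker_spans_py text = chapter_marker_spans_py_alt text := by
  unfold chapter_marker_spans_py chapter_marker_spans_py_alt
  exact pvMain text.toList (text.toList.length + 1) 0 0 le_rfl (by omega)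

-- ===== VERDICT (by name: the statement is the Claim_ definition above) =====
theorem chapter_marker_spans_py_spec : Claim_equal_chapter_marker_spans_py := by
  intro text _
  unfold Spec_chapter_marker_spans_py
  exact pv_eq text
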